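-- pv_equiv track=rewrite | github.com/RogerMo01/thesis-miner | utils/detailed_parser.py | extract_vulgar_names
-- ===== SOURCE A (Python) =====
-- def fix_vulgar_name(name: str) -> str:
--     def remove_prefix(name_: str) -> str:
--         prefix = ""
--         for i in name_:
--             if i in [' ', '.', ';']:
--                 prefix += i
--             else: break
--         return name_.removeprefix(prefix)
--
--     name = remove_prefix(name)
--     name = name[::-1]
--     name = remove_prefix(name)
--     name = name[::-1]
--     return name
--
-- def extract_vulgar_names(raw: str) -> tuple[str, list[str]]:
--     region = "No Especificada"
--
--     # Extract region
--     temp_region = ""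
--     found = False
--     for c in raw:
--         if c == '(':
--             found = True
--         elif c == ')':
--             region = temp_region
--             break
--         elif found:
--             temp_region += c
--
--     raw = raw.replace(f"({region})", "")
--
--     # Extract names
--     names = [fix_vulgar_name(x) for x in raw.split(',')]
--     names = [name for name in names if name != '']
--     return region, names
-- ===== SOURCE B (Python) =====
-- def extract_vulgar_names(raw: str) -> tuple[str, list[str]]:
--     # Region by index arithmetic: text strictly between the first '(' and the
--     # first ')' (dropping any nested '('); default when no ')' exists.
--     jc = raw.find(')')
--     if jc == -1:
--         region = "No Especificada"
--     else:
--         jo = raw.find('(')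
--         region = raw[jo + 1:jc].replace('(', '') if jo != -1 and jo < jc else ''
--
--     raw = raw.replace(f"({region})", "")
--     names = [s for s in (x.strip(' .;') for x in raw.split(',')) if s]
--     return region, names
-- ===== Notes on version B (the rewrite author's own statement) =====
-- stated objective: simpler
-- what changed: Region is extracted by find/slice index arithmetic (positions of the first opening and closing parenthesis, dropping nested opening ones) instead of a char-by-char accumulator loop with a found flag, and the reverse-twice prefix-removal helper is replaced by a single str.strip call inside one comprehension.
import Mathlib
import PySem

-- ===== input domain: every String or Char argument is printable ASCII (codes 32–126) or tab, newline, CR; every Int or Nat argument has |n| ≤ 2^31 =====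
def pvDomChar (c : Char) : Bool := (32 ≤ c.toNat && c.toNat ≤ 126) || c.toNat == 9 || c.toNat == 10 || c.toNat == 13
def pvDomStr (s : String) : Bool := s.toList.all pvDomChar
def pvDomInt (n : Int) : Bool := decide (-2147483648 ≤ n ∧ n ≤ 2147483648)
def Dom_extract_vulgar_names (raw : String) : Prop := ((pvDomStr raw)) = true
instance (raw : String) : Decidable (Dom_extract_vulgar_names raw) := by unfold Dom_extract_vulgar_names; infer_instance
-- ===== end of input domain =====

-- B replaces A's char-by-char region accumulator by find/slice index arithmetic and the
-- reverse-twice prefix-stripping helper by str.strip; objective: simpler (a timing run also measured B faster).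

-- ===== PORT A =====

-- the 'for i in name_: if i in [' ','.',';']: prefix += i else: break' loop
def removePrefixLoop : List Char → List Char
  | [] => []
  | c :: rest => if [' ', '.', ';'].contains c then c :: removePrefixLoop rest else []

def remove_prefix (name_ : List Char) : List Char :=
  let pre := removePrefixLoop name_
  -- name_.removeprefix(prefix): exact port — drop it iff it is a prefix, else unchanged
  if pre.isPrefixOf name_ then name_.drop pre.length else name_

def fix_vulgar_name (name : List Char) : List Char :=
  let n1 := remove_prefix name
  let n2 := n1.reverse
  let n3 := remove_prefix n2
  n3.reverse

-- the 'for c in raw' region loop; `some temp` = the break, `none` = loop fell through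
def regionLoop : List Char → List Char → Bool → Option (List Char)
  | [], _, _ => none
  | c :: rest, temp, found =>
    if c = '(' then regionLoop rest temp true
    else if c = ')' then some temp
    else if found then regionLoop rest (temp ++ [c]) found
    else regionLoop rest temp found

def extract_vulgar_names (raw : String) : String × List String :=
  let region : List Char :=
    match regionLoop raw.toList [] false with
    | none => "No Especificada".toList
    | some t => t
  -- raw = raw.replace(f"({region})", "")
  let raw2 := PySem.Chars.replace raw.toList ('(' :: region ++ [')']) []
  -- raw.split(',') : the separator is non-empty, so Python's split returns splitOn
  let names := (PySem.Chars.splitOn raw2 [',']).map fix_vulgar_name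
  let names := names.filter (· ≠ ([] : List Char))
  (String.ofList region, names.map String.ofList)

-- ===== PORT B =====

def altRegion (s : List Char) : List Char :=
  let jc := PySem.Chars.find s [')']
  if jc = -1 then "No Especificada".toList
  else
    let jo := PySem.Chars.find s ['(']
    if jo ≠ -1 ∧ jo < jc then
      PySem.Chars.replace (PySem.Chars.slice s (some (jo + 1)) (some jc)) ['('] []
    else []

def extract_vulgar_names_alt (raw : String) : String × List String :=
  let region := altRegion raw.toList
  let raw2 := PySem.Chars.replace raw.toList ('(' :: region ++ [')']) []
  -- [s for x in raw.split(',') if (s := x.strip(' .;')) != '']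
  let names := (PySem.Chars.splitOn raw2 [',']).filterMap (fun x =>
    let t := PySem.Chars.stripChars x [' ', '.', ';']
    if t = ([] : List Char) then none else some t)
  (String.ofList region, names.map String.ofList)

-- ===== PRECONDITION & SPEC =====
def Spec_extract_vulgar_names (raw : String) (out : String × List String) : Prop := out = extract_vulgar_names_alt raw
instance (raw : String) (out : String × List String) : Decidable (Spec_extract_vulgar_names raw out) := by unfold Spec_extract_vulgar_names; infer_instance

-- ===== CLAIM (what is proved, stated in full; the proofs are below) =====
def Claim_equal_extract_vulgar_names : Prop := ∀ (raw : String), Dom_extract_vulgar_names raw → Spec_extract_vulgar_names raw (extract_vulgar_names raw)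

-- ===== LEMMAS AND PROOFS =====

-- fix_vulgar_name = strip(' .;')
theorem removePrefixLoop_eq (l : List Char) :
    removePrefixLoop l = l.takeWhile (fun c => [' ', '.', ';'].contains c) := by
  induction l with
  | nil => rfl
  | cons c rest ih =>
    rw [removePrefixLoop, List.takeWhile_cons]
    by_cases h : [' ', '.', ';'].contains c = true
    · rw [if_pos h, if_pos h, ih]
    · rw [if_neg h, if_neg h]

theorem dropWhile_eq_drop (p : Char → Bool) (l : List Char) :
    l.dropWhile p = l.drop (l.takeWhile p).length := by
  induction l with
  | nil => rfl
  | cons c t ih =>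
    rw [List.dropWhile_cons, List.takeWhile_cons]
    by_cases h : p c
    · rw [if_pos h, if_pos h, List.length_cons, List.drop_succ_cons, ih]
    · rw [if_neg h, if_neg h, List.length_nil, List.drop_zero]

theorem remove_prefix_eq (l : List Char) :
    remove_prefix l = l.dropWhile (fun c => [' ', '.', ';'].contains c) := by
  unfold remove_prefix
  rw [removePrefixLoop_eq, if_pos (by rw [List.isPrefixOf_iff_prefix]; exact List.takeWhile_prefix _),
    ← dropWhile_eq_drop]

theorem fix_eq_strip (l : List Char) :
    fix_vulgar_name l = PySem.Chars.stripChars l [' ', '.', ';'] := by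
  unfold fix_vulgar_name PySem.Chars.stripChars
  simp only [remove_prefix_eq]

theorem names_eq (l : List (List Char)) :
    ((l.map fix_vulgar_name).filter (· ≠ ([] : List Char))) =
      l.filterMap (fun x =>
        let t := PySem.Chars.stripChars x [' ', '.', ';']
        if t = ([] : List Char) then none else some t) := by
  induction l with
  | nil => rfl
  | cons x t ih =>
    simp only [ne_eq, decide_not] at ih
    rw [List.map_cons, List.filter_cons, List.filterMap_cons]
    simp only [fix_eq_strip]
    by_cases h : PySem.Chars.stripChars x [' ', '.', ';'] = ([] : List Char) <;>
      simp [h, ih]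

-- replace of a single char by '' is filter
theorem replace_go_single (c : Char) (l acc : List Char) (fuel : Nat) (h : l.length ≤ fuel) :
    PySem.Chars.replace.go [c] [] fuel l acc = acc.reverse ++ l.filter (· ≠ c) := by
  induction l generalizing fuel acc with
  | nil =>
    cases fuel <;> simp [PySem.Chars.replace.go]
  | cons d t ih =>
    cases fuel with
    | zero => simp at h
    | succ f =>
      rw [PySem.Chars.replace.go]
      by_cases hd : d = c
      · subst hd
        simp only [List.isPrefixOf, beq_self_eq_true, Bool.and_self, if_pos,
          List.length_cons, List.length_nil, List.drop_succ_cons, List.drop_zero,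
          List.reverse_nil, List.nil_append]
        rw [ih _ _ (by simpa using h)]
        simp
      · have : ([c].isPrefixOf (d :: t)) = false := by
          simp [List.isPrefixOf]; exact fun h' => absurd h'.symm hd
        rw [this]
        simp only [Bool.false_eq_true, if_false]
        rw [ih _ _ (by simpa using h)]
        simp [hd]

theorem replace_single_empty (c : Char) (l : List Char) :
    PySem.Chars.replace l [c] [] = l.filter (· ≠ c) := by
  rw [PySem.Chars.replace]
  simp only [List.isEmpty_cons, Bool.false_eq_true, if_false]
  rw [replace_go_single c l [] l.length le_rfl]
  simp

-- first-occurrence facts via takeWhile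
theorem tw_lt {c : Char} {s : List Char} (h : c ∈ s) :
    (s.takeWhile (· ≠ c)).length < s.length := by
  induction s with
  | nil => simp at h
  | cons d t ih =>
    rw [List.takeWhile_cons]
    by_cases hd : d = c
    · subst hd; simp
    · rw [if_pos (by simp [hd])]
      have : c ∈ t := (List.mem_cons.mp h).resolve_left (fun h' => hd h'.symm)
      simpa using ih this

theorem drop_tw {c : Char} {s : List Char} (h : c ∈ s) :
    s.drop (s.takeWhile (· ≠ c)).length = c :: s.drop ((s.takeWhile (· ≠ c)).length + 1) := by
  induction s with
  | nil => simp at h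
  | cons d t ih =>
    rw [List.takeWhile_cons]
    by_cases hd : d = c
    · subst hd; simp
    · rw [if_pos (by simp [hd])]
      have : c ∈ t := (List.mem_cons.mp h).resolve_left (fun h' => hd h'.symm)
      simpa using ih this

theorem get_lt_tw {c : Char} {s : List Char} {i : Nat}
    (hi : i < (s.takeWhile (· ≠ c)).length) (hl : i < s.length) : s[i] ≠ c := by
  induction s generalizing i with
  | nil => simp at hl
  | cons d t ih =>
    rw [List.takeWhile_cons] at hi
    by_cases hd : d = c
    · rw [if_neg (by simp [hd])] at hi; simp at hi
    · rw [if_pos (by simp [hd])] at hi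
      cases i with
      | zero => simpa using hd
      | succ j =>
        simp only [List.getElem_cons_succ]
        exact ih (by simpa using hi) (by simpa using hl)

-- find of a single char points at the first occurrence
theorem find_single (c : Char) (s : List Char) :
    PySem.Chars.find s [c] =
      if c ∈ s then ((s.takeWhile (· ≠ c)).length : Int) else -1 := by
  by_cases h : c ∈ s
  · rw [if_pos h]
    have hinf : [c] <:+: s := (List.singleton_infix_iff c s).mpr h
    have hnn : 0 ≤ PySem.Chars.find s [c] := (PySem.Chars.find_nonneg_iff s [c]).mpr hinf
    obtain ⟨hpre, hmin⟩ := PySem.Chars.find_spec hnn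
    have h1 : (s.takeWhile (· ≠ c)).length ≤ (PySem.Chars.find s [c]).toNat := by
      by_contra hlt
      have hjlt : (PySem.Chars.find s [c]).toNat < (s.takeWhile (· ≠ c)).length := by omega
      have hjs : (PySem.Chars.find s [c]).toNat < s.length := lt_of_lt_of_le hjlt (le_of_lt (tw_lt h))
      have hget : s[(PySem.Chars.find s [c]).toNat] = c := by
        rcases hpre with ⟨u, hu⟩
        have h0 : (s.drop (PySem.Chars.find s [c]).toNat)[0]'(by rw [← hu]; simp) = c := by
          simp [← hu]
        simpa [List.getElem_drop] using h0
      exact absurd hget (get_lt_tw hjlt hjs)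
    have h2 : (PySem.Chars.find s [c]).toNat ≤ (s.takeWhile (· ≠ c)).length := by
      by_contra hlt
      exact hmin (s.takeWhile (· ≠ c)).length (by omega) (by rw [drop_tw h]; exact ⟨_, rfl⟩)
    omega
  · rw [if_neg h]
    exact (PySem.Chars.find_eq_neg_one_iff s [c]).mpr
      (fun hinf => h ((List.singleton_infix_iff c s).mp hinf))

-- the canonical region value both programs compute when a ')' exists
def canonRegion (s : List Char) : List Char :=
  ((s.takeWhile (· ≠ ')')).dropWhile (· ≠ '(')).filter (· ≠ '(')

theorem regionLoop_true (s : List Char) : ∀ temp,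
    regionLoop s temp true =
      if ')' ∈ s then some (temp ++ (s.takeWhile (· ≠ ')')).filter (· ≠ '(')) else none := by
  induction s with
  | nil => intro temp; simp [regionLoop]
  | cons c rest ih =>
    intro temp
    rw [regionLoop]
    by_cases hp : c = '('
    · subst hp
      rw [if_pos rfl, ih]
      simp
    · rw [if_neg hp]
      by_cases hc : c = ')'
      · subst hc
        rw [if_pos rfl]
        simp
      · rw [if_neg hc, if_pos rfl, ih]
        have hmem : ')' ∈ c :: rest ↔ ')' ∈ rest :=
          ⟨fun h => (List.mem_cons.mp h).resolve_left (fun h' => hc h'.symm),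
           fun h => List.mem_cons.mpr (Or.inr h)⟩
        by_cases hm : ')' ∈ rest
        · rw [if_pos hm, if_pos (hmem.mpr hm)]
          simp [hc, hp]
        · rw [if_neg hm, if_neg (fun h => hm (hmem.mp h))]

theorem regionLoop_false (s : List Char) : ∀ temp,
    regionLoop s temp false =
      if ')' ∈ s then some (temp ++ canonRegion s) else none := by
  induction s with
  | nil => intro temp; simp [regionLoop]
  | cons c rest ih =>
    intro temp
    rw [regionLoop]
    by_cases hp : c = '('
    · subst hp
      rw [if_pos rfl, regionLoop_true]
      unfold canonRegion
      by_cases hm : ')' ∈ rest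
      · rw [if_pos hm, if_pos (by simp [hm])]
        simp
      · rw [if_neg hm, if_neg (by simp [hm])]
    · rw [if_neg hp]
      by_cases hc : c = ')'
      · subst hc
        rw [if_pos rfl, if_pos (by simp)]
        simp [canonRegion]
      · rw [if_neg hc, if_neg (by simp), ih]
        have hmem : ')' ∈ c :: rest ↔ ')' ∈ rest :=
          ⟨fun h => (List.mem_cons.mp h).resolve_left (fun h' => hc h'.symm),
           fun h => List.mem_cons.mpr (Or.inr h)⟩
        by_cases hm : ')' ∈ rest
        · rw [if_pos hm, if_pos (hmem.mpr hm)]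
          simp [canonRegion, hc, hp]
        · rw [if_neg hm, if_neg (fun h => hm (hmem.mp h))]

theorem slice_nat (s : List Char) (a b : Nat) (ha : a ≤ s.length) (hb : b ≤ s.length) :
    PySem.List.slice s (some (a : Int)) (some (b : Int)) = (s.drop a).take (b - a) := by
  have h1 : ¬((a : Int) < 0) := by omega
  have h2 : ¬((b : Int) < 0) := by omega
  simp only [PySem.List.slice, PySem.List.clampIdx, if_neg h1, if_neg h2, Int.toNat_natCast]
  rw [min_eq_left ha, min_eq_left hb]

theorem altRegion_eq_canon (s : List Char) (h : ')' ∈ s) :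
    altRegion s = canonRegion s := by
  unfold altRegion
  have hk := find_single ')' s
  rw [if_pos h] at hk
  set k := (s.takeWhile (· ≠ ')')).length with hkdef
  have hkne : ¬(PySem.Chars.find s [')'] = -1) := by omega
  rw [if_neg hkne]
  have hklen : k ≤ s.length := (List.takeWhile_prefix _).length_le
  have ht : s.takeWhile (· ≠ ')') = s.take k := List.prefix_iff_eq_take.mp (List.takeWhile_prefix _)
  by_cases h2 : '(' ∈ s
  · have hm := find_single '(' s
    rw [if_pos h2] at hm
    set m := (s.takeWhile (· ≠ '(')).length with hmdef
    have hmlen : m < s.length := tw_lt h2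
    by_cases hmk : m < k
    · rw [if_pos (by constructor <;> omega)]
      have : PySem.Chars.find s ['('] + 1 = ((m + 1 : Nat) : Int) := by omega
      rw [this, hk]
      simp only [PySem.Chars.slice_eq_listSlice]
      rw [slice_nat s (m+1) k (by omega) hklen, replace_single_empty]
      unfold canonRegion
      rw [dropWhile_eq_drop]
      have htw : (s.takeWhile (· ≠ ')')).takeWhile (· ≠ '(') = (s.takeWhile (· ≠ '(')).take k := by
        rw [ht, ← List.take_takeWhile]
      have hmt : ((s.takeWhile (· ≠ ')')).takeWhile (· ≠ '(')).length = m := by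
        rw [htw, List.length_take]; omega
      rw [hmt, ht]
      have hdrop : (s.take k).drop m = '(' :: (s.take k).drop (m+1) := by
        rw [List.drop_eq_getElem_cons (by rw [List.length_take]; omega)]
        congr 1
        rw [List.getElem_take]
        have := drop_tw h2
        rw [List.drop_eq_getElem_cons (by omega)] at this
        exact (List.cons.injEq _ _ _ _ ▸ this).1
      rw [hdrop, List.filter_cons]
      simp only [decide_not, ne_eq, decide_true, Bool.not_true, Bool.false_eq_true, if_false]
      rw [List.drop_take]
    · rw [if_neg (by intro hcontra; omega)]
      unfold canonRegion
      have : (s.takeWhile (· ≠ ')')).dropWhile (· ≠ '(') = [] := by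
        rw [List.dropWhile_eq_nil_iff]
        intro x hx
        rw [ht] at hx
        obtain ⟨i, hi, hxi⟩ := List.mem_iff_getElem.mp hx
        rw [List.length_take] at hi
        rw [List.getElem_take] at hxi
        subst hxi
        simpa using get_lt_tw (c := '(') (by omega) (by omega)
      rw [this, List.filter_nil]
  · have hm := find_single '(' s
    rw [if_neg h2] at hm
    rw [if_neg (by intro hcontra; exact hcontra.1 hm)]
    unfold canonRegion
    have : (s.takeWhile (· ≠ ')')).dropWhile (· ≠ '(') = [] := by
      rw [List.dropWhile_eq_nil_iff]
      intro x hx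
      have hxs : x ∈ s := (List.takeWhile_sublist _).subset hx
      simp only [ne_eq, decide_eq_true_eq]
      intro hxp; subst hxp; exact h2 hxs
    rw [this, List.filter_nil]

theorem region_eq (s : List Char) :
    (match regionLoop s [] false with
     | none => "No Especificada".toList
     | some t => t) = altRegion s := by
  by_cases h : ')' ∈ s
  · rw [regionLoop_false s [], if_pos h, altRegion_eq_canon s h]
    simp
  · rw [regionLoop_false s [], if_neg h]
    unfold altRegion
    have hk := find_single ')' s
    rw [if_neg h] at hk
    rw [hk, if_pos rfl]

-- ===== VERDICT (by name: the statement is the Claim_ definition above) =====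
theorem extract_vulgar_names_spec : Claim_equal_extract_vulgar_names := by
  intro raw _
  unfold Spec_extract_vulgar_names extract_vulgar_names extract_vulgar_names_alt
  simp only [region_eq, names_eq]
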